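-- pv_equiv track=rewrite | github.com/Camellia0506-B/Service-Outsourcing-Innovation-and-Entrepreneurship-Competition | AI算法/scripts/generate_job_relations.py | name_to_job_id
-- ===== SOURCE A (Python) =====
-- def name_to_job_id(name: str, jobs: list) -> str:
--     """岗位名称 -> job_id。支持精确匹配和包含匹配。"""
--     name = (name or "").strip()
--     for j in jobs:
--         if (j.get("name") or "").strip() == name:
--             return j.get("job_id", name)
--     for j in jobs:
--         if name in (j.get("name") or ""):
--             return j.get("job_id", name)
--     return name
-- ===== SOURCE B (Python) =====
-- def name_to_job_id(name: str, jobs: list) -> str: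
--     """One pass: exact match returns immediately; first substring match kept as fallback."""
--     name = (name or "").strip()
--     _MISS = object()  # unique sentinel: a job_id may legitimately be any value
--     fallback = _MISS
--     for j in jobs:
--         jn = j.get("name") or ""
--         if jn.strip() == name:
--             return j.get("job_id", name)
--         if fallback is _MISS and name in jn:
--             fallback = j.get("job_id", name)
--     return name if fallback is _MISS else fallback
-- ===== Notes on version B (the rewrite author's own statement) =====
-- stated objective: alternative
-- what changed: B replaces A's two sequential scans over jobs (one for exact match, one for substring match) by a single pass that returns on an exact match and records the first substring match in a sentinel-initialised fallback.
import Mathlib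
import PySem

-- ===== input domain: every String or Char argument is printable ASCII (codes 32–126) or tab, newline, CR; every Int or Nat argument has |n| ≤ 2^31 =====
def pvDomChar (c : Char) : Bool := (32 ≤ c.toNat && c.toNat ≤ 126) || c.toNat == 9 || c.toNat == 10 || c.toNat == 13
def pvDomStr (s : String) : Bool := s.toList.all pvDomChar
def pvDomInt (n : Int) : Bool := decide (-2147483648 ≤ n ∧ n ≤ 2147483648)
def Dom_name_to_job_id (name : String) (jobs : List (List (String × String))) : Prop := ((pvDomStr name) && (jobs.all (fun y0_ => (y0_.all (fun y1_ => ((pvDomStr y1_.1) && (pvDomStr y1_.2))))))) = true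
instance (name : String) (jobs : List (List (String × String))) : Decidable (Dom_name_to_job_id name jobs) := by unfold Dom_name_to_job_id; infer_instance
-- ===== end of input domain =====

-- B folds A's two scans over jobs into one pass with a fallback for the first substring match; same return value.


-- ===== PORT A =====
-- first loop: exact (stripped) name match
def ntjiExact (n : String) : List (List (String × String)) → Option String
  | [] => none
  | j :: rest =>
    if PySem.Str.strip (((PySem.Dict.mk j).get? "name").getD "") == n then
      some (((PySem.Dict.mk j).get? "job_id").getD n)
    else ntjiExact n rest

-- second loop: substring match
def ntjiSub (n : String) : List (List (String × String)) → Option String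
  | [] => none
  | j :: rest =>
    if PySem.Str.isIn n (((PySem.Dict.mk j).get? "name").getD "") then
      some (((PySem.Dict.mk j).get? "job_id").getD n)
    else ntjiSub n rest

def name_to_job_id (name : String) (jobs : List (List (String × String))) : String :=
  let n := PySem.Str.strip name
  match ntjiExact n jobs with
  | some r => r
  | none =>
    match ntjiSub n jobs with
    | some r => r
    | none => n

-- ===== PORT B =====
-- single pass; fb is B's sentinel-valued fallback (none = sentinel)
def ntjiAltLoop (n : String) : List (List (String × String)) → Option String → String
  | [], fb => fb.getD n
  | j :: rest, fb =>
    let jn := ((PySem.Dict.mk j).get? "name").getD ""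
    if PySem.Str.strip jn == n then ((PySem.Dict.mk j).get? "job_id").getD n
    else
      ntjiAltLoop n rest
        (if fb.isNone && PySem.Str.isIn n jn then
           some (((PySem.Dict.mk j).get? "job_id").getD n)
         else fb)

def name_to_job_id_alt (name : String) (jobs : List (List (String × String))) : String :=
  ntjiAltLoop (PySem.Str.strip name) jobs none

-- ===== PRECONDITION & SPEC =====
def Spec_name_to_job_id (name : String) (jobs : List (List (String × String))) (out : String) : Prop := out = name_to_job_id_alt name jobs
instance (name : String) (jobs : List (List (String × String))) (out : String) : Decidable (Spec_name_to_job_id name jobs out) := by unfold Spec_name_to_job_id; infer_instance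

-- ===== CLAIM (what is proved, stated in full; the proofs are below) =====
def Claim_equal_name_to_job_id : Prop := ∀ (name : String) (jobs : List (List (String × String))), Dom_name_to_job_id name jobs → Spec_name_to_job_id name jobs (name_to_job_id name jobs)

-- ===== LEMMAS AND PROOFS =====
-- loop invariant: B's single pass equals A's exact scan, else the pending fallback, else A's substring scan
theorem ntjiAltLoop_eq (n : String) (jobs : List (List (String × String))) (fb : Option String) :
    ntjiAltLoop n jobs fb =
      match ntjiExact n jobs with
      | some r => r
      | none =>
        match fb with
        | some f => f
        | none => (ntjiSub n jobs).getD n := by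
  induction jobs generalizing fb with
  | nil => cases fb <;> simp [ntjiAltLoop, ntjiExact, ntjiSub]
  | cons j rest ih =>
    simp only [ntjiAltLoop, ntjiExact, ntjiSub]
    by_cases he : (PySem.Str.strip (((PySem.Dict.mk j).get? "name").getD "") == n) = true
    · simp [he]
    · simp only [he, ih]
      cases fb with
      | some f => simp
      | none =>
        by_cases hs :
            PySem.Chars.isIn n.toList ((((PySem.Dict.mk j).get? "name").getD "").toList) = true <;>
          cases ntjiExact n rest <;> simp [hs]

-- ===== VERDICT (by name: the statement is the Claim_ definition above) =====
theorem name_to_job_id_spec : Claim_equal_name_to_job_id := by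
  intro name jobs _
  unfold Spec_name_to_job_id name_to_job_id name_to_job_id_alt
  rw [ntjiAltLoop_eq]
  cases h : ntjiExact (PySem.Str.strip name) jobs <;>
    cases h2 : ntjiSub (PySem.Str.strip name) jobs <;> simp [h, h2]
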